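-- pv_equiv track=rewrite | github.com/Phacenox/6daycalendar | SixDayCalendar.py | date_index_generator
-- ===== SOURCE A (Python) =====
-- def date_index_generator(days, max_columns, num_rows):
--     col = 0
--     row = 0
--     for i in range(0, days):
--         yield (col, row), i
--         col += 1
--         if col >= max_columns and row < num_rows - 1:
--             col = 0
--             row += 1
-- ===== SOURCE B (Python) =====
-- def date_index_generator(days, max_columns, num_rows):
--     k = max(max_columns, 1)
--     fullrows = max(num_rows - 1, 0)
--     filled = fullrows * k
--     for i in range(days):
--         if i < filled:
--             yield (i % k, i // k), i
--         else:
--             yield (i - filled, fullrows), i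
-- ===== Notes on version B (the rewrite author's own statement) =====
-- stated objective: simpler
-- what changed: Replaces the stateful col/row accumulator with a per-index closed form: effective row width k=max(max_columns,1) and filled=max(num_rows-1,0)*k give each position arithmetically.
import Mathlib
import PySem

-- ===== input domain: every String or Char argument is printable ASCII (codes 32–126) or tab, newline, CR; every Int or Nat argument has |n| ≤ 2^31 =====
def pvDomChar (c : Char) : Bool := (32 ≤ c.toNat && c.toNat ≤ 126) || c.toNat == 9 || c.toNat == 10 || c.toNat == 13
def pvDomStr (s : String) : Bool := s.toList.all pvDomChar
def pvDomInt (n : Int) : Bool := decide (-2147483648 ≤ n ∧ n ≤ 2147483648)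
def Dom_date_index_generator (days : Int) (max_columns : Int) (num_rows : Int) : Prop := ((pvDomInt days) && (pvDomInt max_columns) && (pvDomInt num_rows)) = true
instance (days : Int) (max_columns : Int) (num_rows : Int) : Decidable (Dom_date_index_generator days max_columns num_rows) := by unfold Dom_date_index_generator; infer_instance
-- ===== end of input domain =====

-- B replaces A's stateful col/row accumulator by a per-index closed-form position (simpler arithmetic, same O(days) cost).


-- ===== PORT A =====
-- A's loop body: yield the current (col,row) with i, advance col, wrap when the row is full and not the last row
def pvStepA (max_columns num_rows : Int) (s : Int × Int × List ((Int × Int) × Int)) (i : Int) :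
    Int × Int × List ((Int × Int) × Int) :=
  let acc := s.2.2 ++ [((s.1, s.2.1), i)]
  let col := s.1 + 1
  if col ≥ max_columns ∧ s.2.1 < num_rows - 1 then (0, s.2.1 + 1, acc) else (col, s.2.1, acc)

def date_index_generator (days : Int) (max_columns : Int) (num_rows : Int) : List ((Int × Int) × Int) :=
  ((PySem.List.pyRange 0 days 1).foldl (pvStepA max_columns num_rows) (0, 0, [])).2.2

-- ===== PORT B =====
-- B's loop body: the closed-form position of day i (grid of fullrows full rows of width k, then a final row)
def pvPos (k fullrows filled i : Int) : Int × Int :=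
  if i < filled then (PySem.Int.mod i k, PySem.Int.floordiv i k) else (i - filled, fullrows)

def date_index_generator_alt (days : Int) (max_columns : Int) (num_rows : Int) : List ((Int × Int) × Int) :=
  let k := max max_columns 1
  let fullrows := max (num_rows - 1) 0
  let filled := fullrows * k
  (PySem.List.pyRange 0 days 1).map (fun i => (pvPos k fullrows filled i, i))

-- ===== PRECONDITION & SPEC =====
def Spec_date_index_generator (days : Int) (max_columns : Int) (num_rows : Int) (out : List ((Int × Int) × Int)) : Prop := out = date_index_generator_alt days max_columns num_rows
instance (days : Int) (max_columns : Int) (num_rows : Int) (out : List ((Int × Int) × Int)) : Decidable (Spec_date_index_generator days max_columns num_rows out) := by unfold Spec_date_index_generator; infer_instance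

-- ===== CLAIM (what is proved, stated in full; the proofs are below) =====
def Claim_equal_date_index_generator : Prop := ∀ (days : Int) (max_columns : Int) (num_rows : Int), Dom_date_index_generator days max_columns num_rows → Spec_date_index_generator days max_columns num_rows (date_index_generator days max_columns num_rows)

-- ===== LEMMAS AND PROOFS =====

-- On nonnegative arguments with positive divisor, PySem's floor mod/div are Lean's emod/ediv.
theorem pvPos_eq (k fullrows filled i : Int) (hk : 0 < k) (_hi : 0 ≤ i) :
    pvPos k fullrows filled i = if i < filled then (i % k, i / k) else (i - filled, fullrows) := by
  unfold pvPos
  rw [PySem.Int.mod_eq_emod_of_pos hk, PySem.Int.floordiv_eq_ediv_of_pos hk]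

-- A's state update sends the closed-form position at n to the one at n+1.
theorem pvPos_step (max_columns num_rows n : Int) (hn : 0 ≤ n) :
    pvStepA max_columns num_rows
      (((pvPos (max max_columns 1) (max (num_rows - 1) 0) (max (num_rows - 1) 0 * max max_columns 1) n).1,
        (pvPos (max max_columns 1) (max (num_rows - 1) 0) (max (num_rows - 1) 0 * max max_columns 1) n).2,
        ([] : List ((Int × Int) × Int))) ) n
    = ((pvPos (max max_columns 1) (max (num_rows - 1) 0) (max (num_rows - 1) 0 * max max_columns 1) (n+1)).1,
       (pvPos (max max_columns 1) (max (num_rows - 1) 0) (max (num_rows - 1) 0 * max max_columns 1) (n+1)).2,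
       [((pvPos (max max_columns 1) (max (num_rows - 1) 0) (max (num_rows - 1) 0 * max max_columns 1) n, n))]) := by
  set k := max max_columns 1 with hkdef
  set fullrows := max (num_rows - 1) 0 with hfr
  set filled := fullrows * k with hfl
  have hk : 0 < k := by omega
  rw [pvPos_eq k fullrows filled n hk hn, pvPos_eq k fullrows filled (n+1) hk (by omega)]
  by_cases h : n < filled
  · -- in the fully-filled region
    have hfr0 : 0 < fullrows := by
      by_contra hc
      have : filled ≤ 0 := by
        have : fullrows ≤ 0 := by omega
        nlinarith
      omega
    have hnr : fullrows = num_rows - 1 := by omega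
    have hmod0 : 0 ≤ n % k := Int.emod_nonneg n (by omega)
    have hmodk : n % k < k := Int.emod_lt_of_pos n hk
    have hdiv0 : 0 ≤ n / k := Int.ediv_nonneg hn (le_of_lt hk)
    have hdivlt : n / k < fullrows := by
      rw [Int.ediv_lt_iff_lt_mul hk]; omega
    have hdecomp : k * (n / k) + n % k = n := Int.mul_ediv_add_emod n k
    simp only [pvStepA, h]
    by_cases hw : n % k + 1 ≥ max_columns ∧ n / k < num_rows - 1
    · -- wrap: the row is full
      have hmtop : n % k = k - 1 := by
        have hk1 : k = max_columns ∨ k = 1 := by omega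
        rcases hk1 with h1 | h1 <;> omega
      have hnsucc : n + 1 = (n / k + 1) * k := by nlinarith [hdecomp]
      have hmod1 : (n + 1) % k = 0 := by rw [hnsucc]; exact Int.mul_emod_left _ _
      have hdiv1 : (n + 1) / k = n / k + 1 := by
        rw [hnsucc]; exact Int.mul_ediv_cancel _ (by omega)
      by_cases h1 : n + 1 < filled
      · simp [hw, h1, hmod1, hdiv1]
      · -- n+1 = filled: both forms give (0, fullrows)
        have hfe : n + 1 = filled := by omega
        have : n / k + 1 = fullrows := by
          have := hnsucc; rw [hfe, hfl] at this; exact mul_right_cancel₀ (by omega) this.symm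
        simp [hw, h1]
        omega
    · -- no wrap: column advances within the row
      have hw' : ¬ (n % k + 1 ≥ max_columns) := by
        intro hc; exact hw ⟨hc, by omega⟩
      have hmlt : n % k + 1 < k := by omega
      have hnsucc : k * (n / k) + (n % k + 1) = n + 1 := by omega
      have hmod1 : (n + 1) % k = n % k + 1 := by
        rw [← hnsucc, show k * (n / k) + (n % k + 1) = (n % k + 1) + k * (n / k) by ring,
          Int.add_mul_emod_self_left, Int.emod_eq_of_lt (by omega) hmlt]
      have hdiv1 : (n + 1) / k = n / k := by
        rw [← hnsucc, show k * (n / k) + (n % k + 1) = (n % k + 1) + k * (n / k) by ring,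
          Int.add_mul_ediv_left _ _ (by omega : k ≠ 0),
          Int.ediv_eq_zero_of_lt (by omega) hmlt]
        ring
      have h1 : n + 1 < filled := by
        by_contra hc
        have hfe : n + 1 = filled := by omega
        have : (n + 1) % k = 0 := by
          rw [hfe, hfl, mul_comm]; exact Int.mul_emod_right _ _
        omega
      simp [hw', h1, hmod1, hdiv1]
  · -- final row: never wraps again
    have h1 : ¬ (n + 1 < filled) := by omega
    simp only [pvStepA, if_neg h, if_neg h1]
    split_ifs with hc
    · exact absurd hc.2 (by omega)
    · simp only [Prod.mk.injEq]
      refine ⟨by ring, by simp⟩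

-- Loop invariant: after processing 0..n-1, A's state is the closed-form position at n
-- and the accumulator is B's list.
theorem pvInv (max_columns num_rows : Int) (n : Nat) :
    (PySem.List.pyRange 0 (n : Int) 1).foldl (pvStepA max_columns num_rows) (0, 0, []) =
      ((pvPos (max max_columns 1) (max (num_rows - 1) 0) (max (num_rows - 1) 0 * max max_columns 1) (n : Int)).1,
       (pvPos (max max_columns 1) (max (num_rows - 1) 0) (max (num_rows - 1) 0 * max max_columns 1) (n : Int)).2,
       (PySem.List.pyRange 0 (n : Int) 1).map
         (fun i => (pvPos (max max_columns 1) (max (num_rows - 1) 0) (max (num_rows - 1) 0 * max max_columns 1) i, i))) := by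
  set k := max max_columns 1 with hkdef
  set fullrows := max (num_rows - 1) 0 with hfr
  set filled := fullrows * k with hfl
  have hk : 0 < k := by omega
  induction n with
  | zero =>
      rw [Nat.cast_zero]
      rw [pvPos_eq k fullrows filled 0 hk le_rfl]
      have hz : PySem.List.pyRange 0 (0 : Int) 1 = [] := PySem.List.pyRange_one_eq_nil le_rfl
      rw [hz]
      simp only [List.foldl_nil, List.map_nil]
      by_cases h0 : (0 : Int) < filled
      · simp [h0]
      · have : filled = 0 := by
          have : 0 ≤ filled := by positivity
          omega
        simp [this]
        have h2 : fullrows = 0 := by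
          by_contra hc
          have h3 : 0 < fullrows := by omega
          nlinarith
        omega
  | succ m ih =>
      have hsplit : PySem.List.pyRange 0 ((m + 1 : Nat) : Int) 1
          = PySem.List.pyRange 0 (m : Int) 1 ++ [(m : Int)] := by
        push_cast
        exact PySem.List.pyRange_one_succ_right (by positivity)
      rw [hsplit, List.foldl_append, List.map_append, ih]
      have hstep := pvPos_step max_columns num_rows (m : Int) (by positivity)
      rw [← hkdef, ← hfr, ← hfl] at hstep
      -- pvStepA appends to the accumulator in the same way regardless of its prior content
      have hacc : ∀ (c r : Int) (acc : List ((Int × Int) × Int)) (i : Int),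
          pvStepA max_columns num_rows (c, r, acc) i
            = ((pvStepA max_columns num_rows (c, r, []) i).1,
               (pvStepA max_columns num_rows (c, r, []) i).2.1,
               acc ++ (pvStepA max_columns num_rows (c, r, []) i).2.2) := by
        intro c r acc i
        simp only [pvStepA]
        split_ifs <;> simp
      simp only [List.foldl_cons, List.foldl_nil, List.map_cons, List.map_nil]
      rw [hacc, hstep]
      push_cast
      simp

-- ===== VERDICT (by name: the statement is the Claim_ definition above) =====
theorem date_index_generator_spec : Claim_equal_date_index_generator := by
  intro days max_columns num_rows _
  unfold Spec_date_index_generator date_index_generator date_index_generator_alt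
  by_cases hd : days ≤ 0
  · rw [PySem.List.pyRange_one_eq_nil hd]; simp
  · obtain ⟨n, rfl⟩ : ∃ n : Nat, days = (n : Int) :=
      ⟨days.toNat, (Int.toNat_of_nonneg (by omega)).symm⟩
    rw [pvInv max_columns num_rows n]
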